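-- pv_equiv track=rewrite | github.com/FHNW-Security-Lab/ms-sso-openconnect | ui/src/vpn_ui/privileged_helper.py | _build_openconnect_command
-- ===== SOURCE A (Python) =====
-- def _build_openconnect_command(
--     openconnect_path: str,
--     address: str,
--     protocol: str,
--     cookies: dict,
--     no_dtls: bool,
--     username: str | None,
--     cached_usergroup: str | None,
-- ) -> tuple[list[str], str | None]:
--     cookie_data = dict(cookies or {})
--     cookie_data.pop("_gateway_ip", None)
--     proto_flag = "gp" if protocol == "gp" else "anyconnect"
--
--     gp_cookie_type = None
--     if protocol == "gp":
--         if cached_usergroup: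
--             gp_cookie_type = cached_usergroup
--             if "portal-userauthcookie" in cookie_data:
--                 cookie_str = cookie_data["portal-userauthcookie"]
--             elif "prelogin-cookie" in cookie_data:
--                 cookie_str = cookie_data["prelogin-cookie"]
--             else:
--                 cookie_str = "; ".join([f"{k}={v}" for k, v in cookie_data.items()])
--         elif "prelogin-cookie" in cookie_data:
--             cookie_str = cookie_data["prelogin-cookie"]
--             gp_cookie_type = "portal:prelogin-cookie"
--         elif "portal-userauthcookie" in cookie_data:
--             cookie_str = cookie_data["portal-userauthcookie"]
--             gp_cookie_type = "portal:portal-userauthcookie"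
--         elif "SAMLResponse" in cookie_data:
--             cookie_str = cookie_data["SAMLResponse"]
--             gp_cookie_type = "prelogin-cookie"
--         elif "SESSID" in cookie_data:
--             cookie_str = cookie_data["SESSID"]
--             gp_cookie_type = "portal-userauthcookie"
--         else:
--             cookie_str = "; ".join([f"{k}={v}" for k, v in cookie_data.items()])
--             gp_cookie_type = "portal-userauthcookie"
--     else:
--         cookie_str = "; ".join([f"{k}={v}" for k, v in cookie_data.items()])
--
--     use_stdin_cookie = protocol == "gp" and "prelogin-cookie" in cookie_data
--
--     if use_stdin_cookie:
--         cmd = [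
--             openconnect_path,
--             "--verbose",
--             f"--protocol={proto_flag}",
--             "--passwd-on-stdin",
--             address,
--         ]
--     else:
--         cmd = [
--             openconnect_path,
--             "--verbose",
--             f"--protocol={proto_flag}",
--             f"--cookie={cookie_str}",
--             address,
--         ]
--
--     if protocol == "gp":
--         cmd.insert(2, "--os=linux-64")
--         cmd.insert(2, "--useragent=PAN GlobalProtect")
--         if username:
--             cmd.insert(2, f"--user={username}")
--         if gp_cookie_type:
--             cmd.insert(2, f"--usergroup={gp_cookie_type}")
--
--     if no_dtls:
--         cmd.insert(2, "--no-dtls")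
--
--     return cmd, (cookie_str if use_stdin_cookie else None)
-- ===== SOURCE B (Python) =====
-- def _build_openconnect_command(
--     openconnect_path,
--     address,
--     protocol,
--     cookies,
--     no_dtls,
--     username,
--     cached_usergroup,
-- ):
--     cookie_data = dict(cookies or {})
--     cookie_data.pop("_gateway_ip", None)
--     is_gp = protocol == "gp"
--     joined = "; ".join(f"{k}={v}" for k, v in cookie_data.items())
--
--     gp_cookie_type = None
--     cookie_str = joined
--     if is_gp:
--         if cached_usergroup:
--             ranks = {"portal-userauthcookie": 0, "prelogin-cookie": 1}
--             best = min((k for k in cookie_data if k in ranks),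
--                        key=ranks.get, default=None)
--             gp_cookie_type = cached_usergroup
--             if best is not None:
--                 cookie_str = cookie_data[best]
--         else:
--             ranks = {"prelogin-cookie": 0, "portal-userauthcookie": 1,
--                      "SAMLResponse": 2, "SESSID": 3}
--             types = {"prelogin-cookie": "portal:prelogin-cookie",
--                      "portal-userauthcookie": "portal:portal-userauthcookie",
--                      "SAMLResponse": "prelogin-cookie",
--                      "SESSID": "portal-userauthcookie"}
--             best = min((k for k in cookie_data if k in ranks),
--                        key=ranks.get, default=None)
--             if best is None:
--                 gp_cookie_type = "portal-userauthcookie"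
--             else:
--                 cookie_str = cookie_data[best]
--                 gp_cookie_type = types[best]
--
--     use_stdin = is_gp and "prelogin-cookie" in cookie_data
--     spec = [
--         (True, openconnect_path),
--         (True, "--verbose"),
--         (no_dtls, "--no-dtls"),
--         (is_gp and bool(gp_cookie_type), f"--usergroup={gp_cookie_type}"),
--         (is_gp and bool(username), f"--user={username}"),
--         (is_gp, "--useragent=PAN GlobalProtect"),
--         (is_gp, "--os=linux-64"),
--         (True, f"--protocol={'gp' if is_gp else 'anyconnect'}"),
--         (not use_stdin, f"--cookie={cookie_str}"),
--         (use_stdin, "--passwd-on-stdin"),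
--         (True, address),
--     ]
--     return [arg for cond, arg in spec if cond], (cookie_str if use_stdin else None)
-- ===== Notes on version B (the rewrite author's own statement) =====
-- stated objective: alternative
-- what changed: Inverts the cookie selection: instead of A's nested if/elif membership cascade over fixed keys, B iterates the cookie dict once and picks the present key of minimal priority rank with min(..., key=ranks.get), and it assembles the command by filtering one declarative (condition, flag) table instead of A's repeated cmd.insert(2, ...).
import Mathlib
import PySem

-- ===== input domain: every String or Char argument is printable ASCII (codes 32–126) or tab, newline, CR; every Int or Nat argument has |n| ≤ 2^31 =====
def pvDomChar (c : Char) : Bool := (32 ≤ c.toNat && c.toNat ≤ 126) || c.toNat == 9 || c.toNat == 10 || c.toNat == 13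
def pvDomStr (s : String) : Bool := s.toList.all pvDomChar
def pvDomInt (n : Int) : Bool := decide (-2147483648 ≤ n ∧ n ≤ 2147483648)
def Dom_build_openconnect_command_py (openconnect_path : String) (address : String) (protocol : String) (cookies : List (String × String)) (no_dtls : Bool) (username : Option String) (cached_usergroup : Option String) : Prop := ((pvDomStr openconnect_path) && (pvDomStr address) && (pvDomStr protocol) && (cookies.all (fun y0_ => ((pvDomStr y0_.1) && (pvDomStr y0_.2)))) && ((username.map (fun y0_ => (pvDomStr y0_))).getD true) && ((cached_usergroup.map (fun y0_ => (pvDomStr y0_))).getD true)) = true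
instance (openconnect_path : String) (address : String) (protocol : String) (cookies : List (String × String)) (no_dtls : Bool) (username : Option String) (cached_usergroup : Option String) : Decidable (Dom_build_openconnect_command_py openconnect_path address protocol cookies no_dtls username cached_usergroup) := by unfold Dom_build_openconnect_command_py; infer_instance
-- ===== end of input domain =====

-- B selects the GP cookie by iterating the cookie dict once and taking the present key of minimal
-- priority rank (min over the dict's keys) instead of A's nested if/elif membership cascade, and
-- assembles the command by filtering one declarative (condition, flag) table instead of repeated
-- insert(2, ...); same return value everywhere (alternative decomposition, not faster).


-- ===== PORT A =====
-- Python truthiness of an optional string argument ('if x:' on str|None)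
def pyTruthyOptStr (o : Option String) : Bool :=
  match o with
  | none => false
  | some s => !(s == "")

-- '; '.join(f"{k}={v}" for k, v in d.items())
def pyJoinItems (d : PySem.Dict String String) : String :=
  PySem.Str.join "; " (d.items.map (fun p => p.1 ++ "=" ++ p.2))

def build_openconnect_command_py (openconnect_path : String) (address : String) (protocol : String) (cookies : List (String × String)) (no_dtls : Bool) (username : Option String) (cached_usergroup : Option String) : List String × Option String :=
  let cookie_data := (PySem.Dict.ofList cookies).erase "_gateway_ip"
  let proto_flag := if protocol == "gp" then "gp" else "anyconnect"
  let pair : String × Option String :=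
    if protocol == "gp" then
      if pyTruthyOptStr cached_usergroup then
        let t := cached_usergroup.getD ""
        if cookie_data.contains "portal-userauthcookie" then
          (cookie_data.getD "portal-userauthcookie" "", some t)
        else if cookie_data.contains "prelogin-cookie" then
          (cookie_data.getD "prelogin-cookie" "", some t)
        else
          (pyJoinItems cookie_data, some t)
      else if cookie_data.contains "prelogin-cookie" then
        (cookie_data.getD "prelogin-cookie" "", some "portal:prelogin-cookie")
      else if cookie_data.contains "portal-userauthcookie" then
        (cookie_data.getD "portal-userauthcookie" "", some "portal:portal-userauthcookie")
      else if cookie_data.contains "SAMLResponse" then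
        (cookie_data.getD "SAMLResponse" "", some "prelogin-cookie")
      else if cookie_data.contains "SESSID" then
        (cookie_data.getD "SESSID" "", some "portal-userauthcookie")
      else
        (pyJoinItems cookie_data, some "portal-userauthcookie")
    else
      (pyJoinItems cookie_data, none)
  let cookie_str := pair.1
  let gp_cookie_type := pair.2
  let use_stdin_cookie := protocol == "gp" && cookie_data.contains "prelogin-cookie"
  let cmd :=
    if use_stdin_cookie then
      [openconnect_path, "--verbose", "--protocol=" ++ proto_flag, "--passwd-on-stdin", address]
    else
      [openconnect_path, "--verbose", "--protocol=" ++ proto_flag, "--cookie=" ++ cookie_str, address]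
  let cmd :=
    if protocol == "gp" then
      let cmd := PySem.List.insert cmd 2 "--os=linux-64"
      let cmd := PySem.List.insert cmd 2 "--useragent=PAN GlobalProtect"
      let cmd := if pyTruthyOptStr username then PySem.List.insert cmd 2 ("--user=" ++ username.getD "") else cmd
      let cmd := if pyTruthyOptStr gp_cookie_type then PySem.List.insert cmd 2 ("--usergroup=" ++ gp_cookie_type.getD "") else cmd
      cmd
    else cmd
  let cmd := if no_dtls then PySem.List.insert cmd 2 "--no-dtls" else cmd
  (cmd, if use_stdin_cookie then some cookie_str else none)

-- ===== PORT B =====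
-- the two priority-rank dicts and the type table of Source B, as module-level literals
def ranks2B : PySem.Dict String Nat :=
  PySem.Dict.ofList [("portal-userauthcookie", 0), ("prelogin-cookie", 1)]
def ranks4B : PySem.Dict String Nat :=
  PySem.Dict.ofList [("prelogin-cookie", 0), ("portal-userauthcookie", 1),
                     ("SAMLResponse", 2), ("SESSID", 3)]
def types4B : PySem.Dict String String :=
  PySem.Dict.ofList [("prelogin-cookie", "portal:prelogin-cookie"),
                     ("portal-userauthcookie", "portal:portal-userauthcookie"),
                     ("SAMLResponse", "prelogin-cookie"),
                     ("SESSID", "portal-userauthcookie")]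

-- min((k for k in cookie_data if k in ranks), key=ranks.get, default=None)
def bestRanked (d : PySem.Dict String String) (ranks : PySem.Dict String Nat) : Option String :=
  PySem.List.min? (d.keys.filter (fun k => ranks.contains k)) (fun k => (ranks.get? k).getD 0)

def build_openconnect_command_py_alt (openconnect_path : String) (address : String) (protocol : String) (cookies : List (String × String)) (no_dtls : Bool) (username : Option String) (cached_usergroup : Option String) : List String × Option String :=
  let cookie_data := (PySem.Dict.ofList cookies).erase "_gateway_ip"
  let is_gp := protocol == "gp"
  let joined := PySem.Str.join "; " (cookie_data.items.map (fun p => p.1 ++ "=" ++ p.2))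
  let sel : String × Option String :=
    if is_gp then
      if pyTruthyOptStr cached_usergroup then
        (match bestRanked cookie_data ranks2B with
         | none => joined
         | some b => cookie_data.getD b "", some (cached_usergroup.getD ""))
      else
        match bestRanked cookie_data ranks4B with
        | none => (joined, some "portal-userauthcookie")
        | some b => (cookie_data.getD b "", some (types4B.getD b ""))
    else (joined, none)
  let cookie_str := sel.1
  let gp_cookie_type := sel.2
  let use_stdin := is_gp && cookie_data.contains "prelogin-cookie"
  let spec : List (Bool × String) :=
    [(true, openconnect_path),
     (true, "--verbose"),
     (no_dtls, "--no-dtls"),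
     (is_gp && pyTruthyOptStr gp_cookie_type, "--usergroup=" ++ gp_cookie_type.getD ""),
     (is_gp && pyTruthyOptStr username, "--user=" ++ username.getD ""),
     (is_gp, "--useragent=PAN GlobalProtect"),
     (is_gp, "--os=linux-64"),
     (true, "--protocol=" ++ (if is_gp then "gp" else "anyconnect")),
     (!use_stdin, "--cookie=" ++ cookie_str),
     (use_stdin, "--passwd-on-stdin"),
     (true, address)]
  ((spec.filter (fun p => p.1)).map (fun p => p.2),
   if use_stdin then some cookie_str else none)

-- ===== PRECONDITION & SPEC =====
def Spec_build_openconnect_command_py (openconnect_path : String) (address : String) (protocol : String) (cookies : List (String × String)) (no_dtls : Bool) (username : Option String) (cached_usergroup : Option String) (out : List String × Option String) : Prop := out = build_openconnect_command_py_alt openconnect_path address protocol cookies no_dtls username cached_usergroup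
instance (openconnect_path : String) (address : String) (protocol : String) (cookies : List (String × String)) (no_dtls : Bool) (username : Option String) (cached_usergroup : Option String) (out : List String × Option String) : Decidable (Spec_build_openconnect_command_py openconnect_path address protocol cookies no_dtls username cached_usergroup out) := by unfold Spec_build_openconnect_command_py; infer_instance

-- ===== CLAIM (what is proved, stated in full; the proofs are below) =====
def Claim_equal_build_openconnect_command_py : Prop := ∀ (openconnect_path : String) (address : String) (protocol : String) (cookies : List (String × String)) (no_dtls : Bool) (username : Option String) (cached_usergroup : Option String), Dom_build_openconnect_command_py openconnect_path address protocol cookies no_dtls username cached_usergroup → Spec_build_openconnect_command_py openconnect_path address protocol cookies no_dtls username cached_usergroup (build_openconnect_command_py openconnect_path address protocol cookies no_dtls username cached_usergroup)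

-- ===== LEMMAS AND PROOFS =====
-- list.insert(2, x) on a list with at least two elements drops x right after the second
theorem insert_two_cons_cons (a b x : String) (rest : List String) :
    PySem.List.insert (a :: b :: rest) 2 x = a :: b :: x :: rest := by
  have h : (PySem.List.sliceIndices (rest.length + 1 + 1) (some 2) none 1).1 = 2 := by
    simp [PySem.List.sliceIndices]
    omega
  simp [PySem.List.insert, h]

-- a key of d survives the filter by a rank table iff the table lists it and d has it
theorem mem_filter_ranks (d : PySem.Dict String String) (ranks : PySem.Dict String Nat) (k : String) :
    k ∈ d.keys.filter (fun k => ranks.contains k) ↔ (d.contains k ∧ ranks.contains k) := by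
  simp [List.mem_filter, PySem.Dict.contains_iff_mem_keys]

-- the min-rank present key of the 4-entry table is the first of the priority order present in d
theorem bestRanked4_char (d : PySem.Dict String String) :
    bestRanked d ranks4B =
      (if d.contains "prelogin-cookie" then some "prelogin-cookie"
       else if d.contains "portal-userauthcookie" then some "portal-userauthcookie"
       else if d.contains "SAMLResponse" then some "SAMLResponse"
       else if d.contains "SESSID" then some "SESSID" else none) := by
  rcases hm : bestRanked d ranks4B with _ | m
  · have hnil := (PySem.List.min?_eq_none_iff _ _).1 hm
    have h1 : ¬ d.contains "prelogin-cookie" := fun h => by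
      have := (mem_filter_ranks d ranks4B _).2 ⟨h, by decide⟩; simp [hnil] at this
    have h2 : ¬ d.contains "portal-userauthcookie" := fun h => by
      have := (mem_filter_ranks d ranks4B _).2 ⟨h, by decide⟩; simp [hnil] at this
    have h3 : ¬ d.contains "SAMLResponse" := fun h => by
      have := (mem_filter_ranks d ranks4B _).2 ⟨h, by decide⟩; simp [hnil] at this
    have h4 : ¬ d.contains "SESSID" := fun h => by
      have := (mem_filter_ranks d ranks4B _).2 ⟨h, by decide⟩; simp [hnil] at this
    simp [h1, h2, h3, h4]
  · have hmem := PySem.List.min?_mem hm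
    have hmin := PySem.List.min?_isMin hm
    have hks : m ∈ ranks4B.keys := by
      have := (List.mem_filter.1 hmem).2
      simpa [PySem.Dict.contains_iff_mem_keys] using this
    have hd : d.contains m := ((mem_filter_ranks d ranks4B m).1 hmem).1
    have hm4 : m = "prelogin-cookie" ∨ m = "portal-userauthcookie" ∨
        m = "SAMLResponse" ∨ m = "SESSID" := by
      have : ranks4B.keys = ["prelogin-cookie", "portal-userauthcookie", "SAMLResponse", "SESSID"] := by decide
      rw [this] at hks; simpa using hks
    rcases hm4 with rfl | rfl | rfl | rfl
    · simp [hd]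
    · have h1 : ¬ d.contains "prelogin-cookie" := fun h => by
        have := hmin _ ((mem_filter_ranks d ranks4B _).2 ⟨h, by decide⟩)
        revert this; decide
      simp [h1, hd]
    · have h1 : ¬ d.contains "prelogin-cookie" := fun h => by
        have := hmin _ ((mem_filter_ranks d ranks4B _).2 ⟨h, by decide⟩)
        revert this; decide
      have h2 : ¬ d.contains "portal-userauthcookie" := fun h => by
        have := hmin _ ((mem_filter_ranks d ranks4B _).2 ⟨h, by decide⟩)
        revert this; decide
      simp [h1, h2, hd]
    · have h1 : ¬ d.contains "prelogin-cookie" := fun h => by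
        have := hmin _ ((mem_filter_ranks d ranks4B _).2 ⟨h, by decide⟩)
        revert this; decide
      have h2 : ¬ d.contains "portal-userauthcookie" := fun h => by
        have := hmin _ ((mem_filter_ranks d ranks4B _).2 ⟨h, by decide⟩)
        revert this; decide
      have h3 : ¬ d.contains "SAMLResponse" := fun h => by
        have := hmin _ ((mem_filter_ranks d ranks4B _).2 ⟨h, by decide⟩)
        revert this; decide
      simp [h1, h2, h3, hd]

-- the min-rank present key of the 2-entry table, same shape
theorem bestRanked2_char (d : PySem.Dict String String) :
    bestRanked d ranks2B =
      (if d.contains "portal-userauthcookie" then some "portal-userauthcookie"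
       else if d.contains "prelogin-cookie" then some "prelogin-cookie" else none) := by
  rcases hm : bestRanked d ranks2B with _ | m
  · have hnil := (PySem.List.min?_eq_none_iff _ _).1 hm
    have h1 : ¬ d.contains "portal-userauthcookie" := fun h => by
      have := (mem_filter_ranks d ranks2B _).2 ⟨h, by decide⟩; simp [hnil] at this
    have h2 : ¬ d.contains "prelogin-cookie" := fun h => by
      have := (mem_filter_ranks d ranks2B _).2 ⟨h, by decide⟩; simp [hnil] at this
    simp [h1, h2]
  · have hmem := PySem.List.min?_mem hm
    have hmin := PySem.List.min?_isMin hm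
    have hks : m ∈ ranks2B.keys := by
      have := (List.mem_filter.1 hmem).2
      simpa [PySem.Dict.contains_iff_mem_keys] using this
    have hd : d.contains m := ((mem_filter_ranks d ranks2B m).1 hmem).1
    have hm2 : m = "portal-userauthcookie" ∨ m = "prelogin-cookie" := by
      have : ranks2B.keys = ["portal-userauthcookie", "prelogin-cookie"] := by decide
      rw [this] at hks; simpa using hks
    rcases hm2 with rfl | rfl
    · simp [hd]
    · have h1 : ¬ d.contains "portal-userauthcookie" := fun h => by
        have := hmin _ ((mem_filter_ranks d ranks2B _).2 ⟨h, by decide⟩)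
        revert this; decide
      simp [h1, hd]

-- the type table evaluated at its four keys
theorem types4B_prelogin : types4B.get? "prelogin-cookie" = some "portal:prelogin-cookie" := by decide
theorem types4B_portal : types4B.get? "portal-userauthcookie" = some "portal:portal-userauthcookie" := by decide
theorem types4B_saml : types4B.get? "SAMLResponse" = some "prelogin-cookie" := by decide
theorem types4B_sessid : types4B.get? "SESSID" = some "portal-userauthcookie" := by decide

-- ===== VERDICT (by name: the statement is the Claim_ definition above) =====
set_option maxHeartbeats 2000000 in
theorem build_openconnect_command_py_spec : Claim_equal_build_openconnect_command_py := by
  intro op addr protocol cookies no_dtls username cached_usergroup _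
  unfold Spec_build_openconnect_command_py build_openconnect_command_py build_openconnect_command_py_alt pyJoinItems
  set d := (PySem.Dict.ofList cookies).erase "_gateway_ip" with hd
  simp only [bestRanked2_char, bestRanked4_char, PySem.Dict.contains_eq_isSome_get?]
  cases hgp : (protocol == "gp")
  · cases no_dtls <;> simp [insert_two_cons_cons]
  · 
    rcases h2 : d.get? "prelogin-cookie" with _ | v2 <;>
    rcases h1 : d.get? "portal-userauthcookie" with _ | v1 <;>
    rcases h3 : d.get? "SAMLResponse" with _ | v3 <;>
    rcases h4 : d.get? "SESSID" with _ | v4 <;>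
    rcases cached_usergroup with _ | cu <;>
    (try by_cases hcu : cu = "") <;>
    cases no_dtls <;>
    rcases username with _ | u <;>
    (try by_cases hu : u = "") <;>
    simp_all [pyTruthyOptStr, PySem.Dict.getD_eq_get?_getD, insert_two_cons_cons,
              types4B_prelogin, types4B_portal,
              types4B_saml, types4B_sessid]
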